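-- pv_equiv track=rewrite | github.com/papanokechi/wallis-pcf-lean4 | relay_round10b_extensions.py | compute_pk
-- ===== SOURCE A (Python) =====
-- def compute_pk(N, k):
--     pk = [0]*(N+1); pk[0] = 1
--     ksig = [0]*(N+1)
--     for j in range(1, N+1):
--         s, d = 0, 1
--         while d*d <= j:
--             if j%d == 0: s += d; s += j//d if d != j//d else 0
--             d += 1
--         ksig[j] = k*s
--     for n in range(1, N+1):
--         s = 0
--         for j in range(1, n+1): s += ksig[j]*pk[n-j]
--         pk[n] = s//n
--     return pk
-- ===== SOURCE B (Python) =====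
-- def compute_pk(N, k):
--     ksig = [0]*(N+1)
--     for d in range(1, N+1):
--         for m in range(d, N+1, d):
--             ksig[m] += k*d
--     pk = [1]
--     for n in range(1, N+1):
--         s = 0
--         for j in range(1, n+1):
--             s += ksig[j]*pk[n-j]
--         pk.append(s//n)
--     return pk
-- ===== Notes on version B (the rewrite author's own statement) =====
-- stated objective: alternative
-- what changed: The per-index trial-division loop (while d*d<=j scanning candidate divisors of every j) is replaced by a divisor sieve that strides over multiples (for each d from 1 to N, add k*d to ksig[m] for m=d,2d,...), so the k*sigma table is built in O(N log N) instead of O(N*sqrt(N)); the DP table is grown by append from [1] instead of preallocating [0]*(N+1) and assigning pk[n]. Total time is dominated by the unchanged O(N^2) big-int convolution, so overall speed is essentially the same.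
import Mathlib
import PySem

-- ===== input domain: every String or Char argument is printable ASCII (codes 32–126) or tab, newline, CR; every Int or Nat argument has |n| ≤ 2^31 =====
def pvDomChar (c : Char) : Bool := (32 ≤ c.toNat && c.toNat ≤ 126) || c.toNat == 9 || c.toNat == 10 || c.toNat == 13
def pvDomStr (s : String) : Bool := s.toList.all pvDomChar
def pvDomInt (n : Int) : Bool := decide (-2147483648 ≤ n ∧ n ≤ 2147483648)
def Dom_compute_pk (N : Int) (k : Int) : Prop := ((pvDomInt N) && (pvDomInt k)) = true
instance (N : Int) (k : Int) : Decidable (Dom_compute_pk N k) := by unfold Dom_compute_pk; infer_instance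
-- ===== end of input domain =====

-- B replaces A's per-index trial-division divisor scan by a multiples sieve and grows the
-- DP table by append instead of preallocate-and-set; overall cost is DP-dominated and similar.

-- ===== PORT A =====
-- A's inner 'while d*d <= j' trial-division loop (s, d accumulators as in the Python).
def pvSigGo (j : Int) (s : Int) (d : Int) : Int :=
  if h : d * d ≤ j then
    pvSigGo j
      (if PySem.Int.mod j d = 0 then
        s + d + (if d ≠ PySem.Int.floordiv j d then PySem.Int.floordiv j d else 0)
      else s)
      (d + 1)
  else s
termination_by (j + 1 - d).toNat
decreasing_by
  have hdd : d ≤ d * d := by nlinarith [mul_self_nonneg (2 * d - 1)]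
  omega

def compute_pk (N : Int) (k : Int) : List Int :=
  -- pk = [0]*(N+1); pk[0] = 1   (pySetD is exact under Pre_: 0 ≤ N)
  let pk0 : List Int := PySem.List.pySetD (List.replicate (N + 1).toNat (0 : Int)) 0 1
  -- ksig = [0]*(N+1); for j in range(1, N+1): ... ksig[j] = k*s
  let ksig := (PySem.List.pyRange 1 (N + 1) 1).foldl
      (fun ks j => PySem.List.pySetD ks j (k * pvSigGo j 0 1))
      (List.replicate (N + 1).toNat (0 : Int))
  -- for n in range(1, N+1): s = sum(...); pk[n] = s//n
  (PySem.List.pyRange 1 (N + 1) 1).foldl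
      (fun pk n =>
        let s := (PySem.List.pyRange 1 (n + 1) 1).foldl
            (fun s j => s + PySem.List.pyGetD ksig j 0 * PySem.List.pyGetD pk (n - j) 0) 0
        PySem.List.pySetD pk n (PySem.Int.floordiv s n))
      pk0

-- ===== PORT B =====
def compute_pk_alt (N : Int) (k : Int) : List Int :=
  -- ksig = [0]*(N+1); for d in range(1,N+1): for m in range(d,N+1,d): ksig[m] += k*d
  let ksig := (PySem.List.pyRange 1 (N + 1) 1).foldl
      (fun ks d => (PySem.List.pyRange d (N + 1) d).foldl
          (fun ks m => PySem.List.pySetD ks m (PySem.List.pyGetD ks m 0 + k * d)) ks)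
      (List.replicate (N + 1).toNat (0 : Int))
  -- pk = [1]; for n in range(1,N+1): s = sum(...); pk.append(s//n)
  (PySem.List.pyRange 1 (N + 1) 1).foldl
      (fun pk n =>
        let s := (PySem.List.pyRange 1 (n + 1) 1).foldl
            (fun s j => s + PySem.List.pyGetD ksig j 0 * PySem.List.pyGetD pk (n - j) 0) 0
        pk ++ [PySem.Int.floordiv s n])
      [1]

-- ===== PRECONDITION & SPEC =====
-- A raises IndexError for N < 0 (pk[0] = 1 on the empty list [0]*(N+1)); Pre_ excludes exactly that.
def Pre_compute_pk (N : Int) (k : Int) : Prop := 0 ≤ N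
instance (N : Int) (k : Int) : Decidable (Pre_compute_pk N k) := by unfold Pre_compute_pk; infer_instance
def pvWitness_compute_pk : Int × Int := (5, 2)

def Spec_compute_pk (N : Int) (k : Int) (out : List Int) : Prop := out = compute_pk_alt N k
instance (N : Int) (k : Int) (out : List Int) : Decidable (Spec_compute_pk N k out) := by unfold Spec_compute_pk; infer_instance

-- ===== CLAIM (what is proved, stated in full; the proofs are below) =====
def Claim_equal_compute_pk : Prop := ∀ (N : Int) (k : Int), Dom_compute_pk N k → Pre_compute_pk N k → Spec_compute_pk N k (compute_pk N k)

-- ===== LEMMAS AND PROOFS =====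

-- k * sigma(m) building block: sigma(m) = sum of the divisors of m.
def pvSigma (m : Nat) : Int := ∑ e ∈ Nat.divisors m, (e : Int)

theorem pvSigGo_invariant (j d : Nat) (hj : 1 ≤ j) (hd : 1 ≤ d) (s : Int) :
    pvSigGo (j : Int) s (d : Int)
      = s + ∑ e ∈ (Nat.divisors j).filter (fun e => d ≤ e ∧ e * e ≤ j),
          ((e : Int) + if e * e < j then ((j / e : Nat) : Int) else 0) := by
  have H : ∀ M d, 1 ≤ d → j + 1 - d ≤ M → ∀ s : Int,
      pvSigGo (j : Int) s (d : Int)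
        = s + ∑ e ∈ (Nat.divisors j).filter (fun e => d ≤ e ∧ e * e ≤ j),
            ((e : Int) + if e * e < j then ((j / e : Nat) : Int) else 0) := by
    intro M
    induction M with
    | zero =>
      intro d hd hle s
      have hdj : j < d := by omega
      have hns : ¬ ((d : Int) * d ≤ (j : Int)) := by
        push_cast
        have : j < d * d := by nlinarith
        exact_mod_cast not_le.mpr (by exact_mod_cast this)
      rw [pvSigGo, dif_neg hns]
      have hemp : (Nat.divisors j).filter (fun e => d ≤ e ∧ e * e ≤ j) = ∅ := by
        apply Finset.filter_false_of_mem
        intro e he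
        have := Nat.le_of_dvd (by omega) (Nat.mem_divisors.mp he).1
        intro h; omega
      rw [hemp, Finset.sum_empty, add_zero]
    | succ M ih =>
      intro d hd hle s
      by_cases hc : (d : Int) * d ≤ (j : Int)
      · have hcn : d * d ≤ j := by exact_mod_cast hc
        have hdle : d ≤ j := le_trans (by nlinarith) hcn
        rw [pvSigGo, dif_pos hc]
        have hmodiff : PySem.Int.mod (j : Int) (d : Int) = 0 ↔ d ∣ j := by
          rw [PySem.Int.mod_eq_zero_iff_dvd]; exact Int.natCast_dvd_natCast
        have hfd : PySem.Int.floordiv (j : Int) (d : Int) = ((j / d : Nat) : Int) :=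
          PySem.Int.floordiv_natCast j d
        have hcast : ((d : Int) + 1) = ((d + 1 : Nat) : Int) := by push_cast; ring
        rw [hcast, ih (d + 1) (by omega) (by omega)]
        by_cases hdvd : d ∣ j
        · have hset : (Nat.divisors j).filter (fun e => d ≤ e ∧ e * e ≤ j)
              = insert d ((Nat.divisors j).filter (fun e => d + 1 ≤ e ∧ e * e ≤ j)) := by
            ext e
            simp only [Finset.mem_insert, Finset.mem_filter, Nat.mem_divisors]
            constructor
            · rintro ⟨he, hde, hee⟩
              rcases Nat.eq_or_lt_of_le hde with h | h
              · exact Or.inl h.symm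
              · exact Or.inr ⟨he, by omega, hee⟩
            · rintro (rfl | ⟨he, hde, hee⟩)
              · exact ⟨⟨hdvd, by omega⟩, le_refl _, hcn⟩
              · exact ⟨he, by omega, hee⟩
          have hnotmem : d ∉ (Nat.divisors j).filter (fun e => d + 1 ≤ e ∧ e * e ≤ j) := by
            simp [Finset.mem_filter]
          rw [hset, Finset.sum_insert hnotmem]
          have hiff : d ≠ j / d ↔ d * d < j := by
            constructor
            · intro hne
              rcases Nat.lt_or_ge (d * d) j with h | h
              · exact h
              · exact absurd (by
                  have hj' : d * d = j := le_antisymm hcn h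
                  have : j / d = d := by rw [← hj', Nat.mul_div_cancel_left d (by omega)]
                  omega) hne
            · intro hlt hne
              have : d * (j / d) = j := Nat.mul_div_cancel' hdvd
              rw [← hne] at this
              omega
          rw [if_pos (hmodiff.mpr hdvd), hfd]
          by_cases hlt : d * d < j
          · have h1 : (d : Int) ≠ ((j / d : Nat) : Int) := by
              intro h; exact (hiff.mpr hlt) (by exact_mod_cast h)
            rw [if_pos h1, if_pos hlt]
            push_cast
            ring
          · have h1 : ¬ ((d : Int) ≠ ((j / d : Nat) : Int)) := by
              intro h
              exact hlt (hiff.mp (fun he => h (by exact_mod_cast he)))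
            rw [if_neg h1, if_neg hlt]
            push_cast
            ring
        · have hset : (Nat.divisors j).filter (fun e => d ≤ e ∧ e * e ≤ j)
              = (Nat.divisors j).filter (fun e => d + 1 ≤ e ∧ e * e ≤ j) := by
            apply Finset.filter_congr
            intro e he
            have hediv := (Nat.mem_divisors.mp he).1
            have hne : e ≠ d := fun h => hdvd (h ▸ hediv)
            constructor
            · rintro ⟨h1, h2⟩; exact ⟨by omega, h2⟩
            · rintro ⟨h1, h2⟩; exact ⟨by omega, h2⟩
          rw [if_neg (fun h => hdvd (hmodiff.mp h)), hset]
      · rw [pvSigGo, dif_neg hc]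
        have hcn : j < d * d := by exact_mod_cast not_le.mp hc
        have hemp : (Nat.divisors j).filter (fun e => d ≤ e ∧ e * e ≤ j) = ∅ := by
          apply Finset.filter_false_of_mem
          intro e he h
          obtain ⟨hde, hee⟩ := h
          have : d * d ≤ e * e := Nat.mul_le_mul hde hde
          omega
        rw [hemp, Finset.sum_empty, add_zero]
  exact H (j + 1 - d) d hd (le_refl _) s
theorem pvSig_pairing (j : Nat) (hj : 1 ≤ j) :
    (∑ e ∈ (Nat.divisors j).filter (fun e => e * e ≤ j),
        ((e : Int) + if e * e < j then ((j / e : Nat) : Int) else 0)) = pvSigma j := by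
  have hj0 : j ≠ 0 := by omega
  rw [Finset.sum_add_distrib]
  have h2 : (∑ e ∈ (Nat.divisors j).filter (fun e => e * e ≤ j),
        (if e * e < j then ((j / e : Nat) : Int) else 0))
      = ∑ e ∈ (Nat.divisors j).filter (fun e => e * e < j), ((j / e : Nat) : Int) := by
    rw [Finset.sum_filter, Finset.sum_filter]
    apply Finset.sum_congr rfl
    intro e _
    by_cases h : e * e < j
    · simp [h, le_of_lt h]
    · by_cases h' : e * e ≤ j
      · simp [h, h']
      · simp [h, h']
  rw [h2]
  have hbij : (∑ e ∈ (Nat.divisors j).filter (fun e => e * e < j), ((j / e : Nat) : Int))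
      = ∑ e ∈ (Nat.divisors j).filter (fun e => ¬ e * e ≤ j), (e : Int) := by
    apply Finset.sum_nbij' (i := fun e => j / e) (j := fun e => j / e)
    · intro a ha
      obtain ⟨ha', hlt⟩ := Finset.mem_filter.mp ha
      obtain ⟨hdvd, _⟩ := Nat.mem_divisors.mp ha'
      have ha1 : 1 ≤ a := Nat.pos_of_mem_divisors ha'
      have hq : a * (j / a) = j := Nat.mul_div_cancel' hdvd
      refine Finset.mem_filter.mpr ⟨Nat.mem_divisors.mpr ⟨Nat.div_dvd_of_dvd hdvd, hj0⟩, ?_⟩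
      intro hle
      nlinarith [hq]
    · intro a ha
      obtain ⟨ha', hgt⟩ := Finset.mem_filter.mp ha
      obtain ⟨hdvd, _⟩ := Nat.mem_divisors.mp ha'
      have ha1 : 1 ≤ a := Nat.pos_of_mem_divisors ha'
      have hq : a * (j / a) = j := Nat.mul_div_cancel' hdvd
      have hq1 : 1 ≤ j / a := Nat.div_pos (Nat.le_of_dvd (by omega) hdvd) (by omega)
      refine Finset.mem_filter.mpr ⟨Nat.mem_divisors.mpr ⟨Nat.div_dvd_of_dvd hdvd, hj0⟩, ?_⟩
      nlinarith [hq]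
    · intro a ha
      obtain ⟨ha', _⟩ := Finset.mem_filter.mp ha
      exact Nat.div_div_self (Nat.mem_divisors.mp ha').1 hj0
    · intro a ha
      obtain ⟨ha', _⟩ := Finset.mem_filter.mp ha
      exact Nat.div_div_self (Nat.mem_divisors.mp ha').1 hj0
    · intro a _; rfl
  rw [hbij]
  unfold pvSigma
  exact Finset.sum_filter_add_sum_filter_not (Nat.divisors j) (fun e => e * e ≤ j) _

theorem pvSigGo_eq_sigma (j : Nat) (hj : 1 ≤ j) : pvSigGo (j : Int) 0 1 = pvSigma j := by
  have h1 : ((1 : Nat) : Int) = (1 : Int) := rfl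
  rw [← h1, pvSigGo_invariant j 1 hj (le_refl 1), zero_add]
  rw [← pvSig_pairing j hj]
  apply Finset.sum_congr
  · apply Finset.filter_congr
    intro e he
    have := Nat.pos_of_mem_divisors he
    constructor
    · rintro ⟨_, h⟩; exact h
    · intro h; exact ⟨by omega, h⟩
  · intro e _; rfl
theorem pvAddAt_fold (idxs : List Int) (ks : List Int) (v : Int)
    (hnd : idxs.Nodup) (hin : ∀ i ∈ idxs, 0 ≤ i ∧ i < (ks.length : Int)) :
    (idxs.foldl (fun ks i => PySem.List.pySetD ks i (PySem.List.pyGetD ks i 0 + v)) ks).length = ks.length ∧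
    ∀ m : Nat, (idxs.foldl (fun ks i => PySem.List.pySetD ks i (PySem.List.pyGetD ks i 0 + v)) ks).getD m 0
      = ks.getD m 0 + (if (m : Int) ∈ idxs then v else 0) := by
  induction idxs generalizing ks with
  | nil => simp
  | cons i rest ih =>
    obtain ⟨hi0, hilt⟩ := hin i (by simp)
    obtain ⟨hninr, hnd'⟩ := List.nodup_cons.mp hnd
    simp only [List.foldl_cons]
    have hset : PySem.List.pySetD ks i (PySem.List.pyGetD ks i 0 + v)
        = ks.set i.toNat (ks.getD i.toNat 0 + v) := by
      rw [PySem.List.pySetD_of_nonneg ks _ hi0, PySem.List.pyGetD_eq_getElem ks 0 hi0 (by simpa using hilt)]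
      congr 1
      rw [List.getD_eq_getElem?_getD, List.getElem?_eq_getElem (by omega : i.toNat < ks.length)]
      rfl
    rw [hset]
    have hlen' : (ks.set i.toNat (ks.getD i.toNat 0 + v)).length = ks.length := by simp
    obtain ⟨ihlen, ihget⟩ := ih (ks.set i.toNat (ks.getD i.toNat 0 + v)) hnd'
      (by intro i' hi'; rw [hlen']; exact hin i' (List.mem_cons_of_mem _ hi'))
    refine ⟨by rw [ihlen, hlen'], ?_⟩
    intro m
    rw [ihget m]
    have hgetset : (ks.set i.toNat (ks.getD i.toNat 0 + v)).getD m 0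
        = ks.getD m 0 + (if (m : Int) = i then v else 0) := by
      by_cases hm : m = i.toNat
      · subst hm
        rw [List.getD_eq_getElem?_getD, List.getElem?_set_self' ]
        · simp only [List.getElem?_eq_getElem (by omega : i.toNat < ks.length)]
          rw [if_pos (by omega)]
          simp [List.getD_eq_getElem?_getD, List.getElem?_eq_getElem (by omega : i.toNat < ks.length)]
      · rw [List.getD_eq_getElem?_getD, List.getElem?_set_ne (by omega), ← List.getD_eq_getElem?_getD,
          if_neg (by omega), add_zero]
    rw [hgetset]
    by_cases hmi : (m : Int) = i
    · simp [List.mem_cons, hmi]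
      exact fun h => absurd h hninr
    · by_cases hmr : (m : Int) ∈ rest
      · simp [List.mem_cons, hmi, hmr]
      · simp [List.mem_cons, hmi, hmr]
theorem pvGetD_set_eq (xs : List Int) (n : Nat) (v : Int) (h : n < xs.length) :
    (xs.set n v).getD n 0 = v := by
  rw [List.getD_eq_getElem?_getD, List.getElem?_set_self', List.getElem?_eq_getElem h]
  rfl

theorem pvGetD_set_ne (xs : List Int) (n m : Nat) (v : Int) (h : n ≠ m) :
    (xs.set n v).getD m 0 = xs.getD m 0 := by
  rw [List.getD_eq_getElem?_getD, List.getElem?_set_ne h, ← List.getD_eq_getElem?_getD]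

theorem pvKsigA_char (N k : Int) (hN : 0 ≤ N) (D : Nat) (hD : (D : Int) ≤ N) :
    ((PySem.List.pyRange 1 ((D : Int) + 1) 1).foldl
        (fun ks j => PySem.List.pySetD ks j (k * pvSigGo j 0 1))
        (List.replicate (N + 1).toNat (0 : Int))).length = (N + 1).toNat ∧
    ∀ m : Nat, ((PySem.List.pyRange 1 ((D : Int) + 1) 1).foldl
        (fun ks j => PySem.List.pySetD ks j (k * pvSigGo j 0 1))
        (List.replicate (N + 1).toNat (0 : Int))).getD m 0
      = if 1 ≤ m ∧ m ≤ D then k * pvSigma m else 0 := by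
  induction D with
  | zero =>
    rw [show ((0 : Nat) : Int) + 1 = 1 by norm_num, PySem.List.pyRange_one_eq_nil (le_refl 1)]
    simp only [List.foldl_nil]
    refine ⟨by simp, ?_⟩
    intro m
    rw [if_neg (by omega)]
    simp only [List.getD_eq_getElem?_getD, List.getElem?_replicate]
    split <;> rfl
  | succ D ih =>
    have hD' : (D : Int) ≤ N := by push_cast at hD; omega
    obtain ⟨ihlen, ihget⟩ := ih hD'
    have hcast : ((D + 1 : Nat) : Int) + 1 = ((D : Int) + 1) + 1 := by push_cast; ring
    rw [hcast, PySem.List.pyRange_one_succ_right (show (1:Int) ≤ (D : Int) + 1 by omega), List.foldl_append]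
    simp only [List.foldl_cons, List.foldl_nil]
    have hval : pvSigGo ((D : Int) + 1) 0 1 = pvSigma (D + 1) := by
      rw [show ((D : Int) + 1) = ((D + 1 : Nat) : Int) by push_cast; ring]
      exact pvSigGo_eq_sigma (D + 1) (by omega)
    have hsetc : PySem.List.pySetD
          ((PySem.List.pyRange 1 ((D : Int) + 1) 1).foldl
            (fun ks j => PySem.List.pySetD ks j (k * pvSigGo j 0 1))
            (List.replicate (N + 1).toNat (0 : Int)))
          ((D : Int) + 1) (k * pvSigGo ((D : Int) + 1) 0 1)
        = ((PySem.List.pyRange 1 ((D : Int) + 1) 1).foldl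
            (fun ks j => PySem.List.pySetD ks j (k * pvSigGo j 0 1))
            (List.replicate (N + 1).toNat (0 : Int))).set (D + 1) (k * pvSigma (D + 1)) := by
      rw [hval, show ((D : Int) + 1) = ((D + 1 : Nat) : Int) by push_cast; ring,
        PySem.List.pySetD_natCast]
    rw [hsetc]
    have hDlt : D + 1 < (N + 1).toNat := by omega
    refine ⟨by simpa [ihlen], ?_⟩
    intro m
    by_cases hm : m = D + 1
    · subst hm
      rw [pvGetD_set_eq _ _ _ (by rw [ihlen]; exact hDlt), if_pos (by omega)]
    · rw [pvGetD_set_ne _ _ _ _ (fun h => hm h.symm), ihget m]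
      by_cases h1 : 1 ≤ m ∧ m ≤ D
      · rw [if_pos h1, if_pos (by omega)]
      · rw [if_neg h1, if_neg (by omega)]
theorem pvStride_nodup (d b : Int) (hd : 0 < d) : (PySem.List.pyRange d b d).Nodup := by
  rw [PySem.List.pyRange_of_pos d b hd]
  refine List.Nodup.map ?_ (List.nodup_range)
  intro a b hab
  have h2 : d * (a : Int) = d * (b : Int) := by linarith
  exact_mod_cast mul_left_cancel₀ (by omega : d ≠ 0) h2

theorem pvStride_mem (D m N : Nat) (hm : (m : Int) ≤ (N : Int)) :
    ((m : Int) ∈ PySem.List.pyRange ((D : Int) + 1) ((N : Int) + 1) ((D : Int) + 1))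
      ↔ ((D + 1) ∣ m ∧ 1 ≤ m) := by
  rw [PySem.List.mem_pyRange_iff_of_pos (by omega)]
  constructor
  · rintro ⟨h1, h2, h3⟩
    have hdvd : ((D : Int) + 1) ∣ (m : Int) := by
      have : ((D : Int) + 1) ∣ ((m : Int) - ((D : Int) + 1)) + ((D : Int) + 1) :=
        Dvd.dvd.add h3 dvd_rfl
      simpa using this
    have : ((D + 1 : Nat) : Int) ∣ (m : Int) := by push_cast; exact hdvd
    exact ⟨Int.natCast_dvd_natCast.mp (by exact_mod_cast this), by omega⟩
  · rintro ⟨h1, h2⟩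
    have hle : D + 1 ≤ m := Nat.le_of_dvd (by omega) h1
    have hdvd : ((D : Int) + 1) ∣ (m : Int) := by
      have := Int.natCast_dvd_natCast.mpr h1
      push_cast at this ⊢
      exact this
    exact ⟨by exact_mod_cast hle, by omega, (Dvd.dvd.sub hdvd dvd_rfl)⟩

theorem pvKsigB_char (N k : Int) (hN : 0 ≤ N) (D : Nat) (hD : (D : Int) ≤ N) :
    ((PySem.List.pyRange 1 ((D : Int) + 1) 1).foldl
        (fun ks d => (PySem.List.pyRange d (N + 1) d).foldl
            (fun ks m => PySem.List.pySetD ks m (PySem.List.pyGetD ks m 0 + k * d)) ks)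
        (List.replicate (N + 1).toNat (0 : Int))).length = (N + 1).toNat ∧
    ∀ m : Nat, m < (N + 1).toNat → ((PySem.List.pyRange 1 ((D : Int) + 1) 1).foldl
        (fun ks d => (PySem.List.pyRange d (N + 1) d).foldl
            (fun ks m => PySem.List.pySetD ks m (PySem.List.pyGetD ks m 0 + k * d)) ks)
        (List.replicate (N + 1).toNat (0 : Int))).getD m 0
      = ∑ d ∈ Finset.Icc 1 D, (if d ∣ m ∧ 1 ≤ m then k * (d : Int) else 0) := by
  induction D with
  | zero =>
    rw [show ((0 : Nat) : Int) + 1 = 1 by norm_num, PySem.List.pyRange_one_eq_nil (le_refl 1)]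
    simp only [List.foldl_nil]
    refine ⟨by simp, ?_⟩
    intro m hm
    rw [show Finset.Icc 1 0 = ∅ from rfl, Finset.sum_empty]
    simp only [List.getD_eq_getElem?_getD, List.getElem?_replicate]
    split <;> rfl
  | succ D ih =>
    have hD' : (D : Int) ≤ N := by push_cast at hD; omega
    obtain ⟨ihlen, ihget⟩ := ih hD'
    have hcast : ((D + 1 : Nat) : Int) + 1 = ((D : Int) + 1) + 1 := by push_cast; ring
    rw [hcast, PySem.List.pyRange_one_succ_right (show (1:Int) ≤ (D : Int) + 1 by omega), List.foldl_append]
    simp only [List.foldl_cons, List.foldl_nil]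
    obtain ⟨alen, aget⟩ := pvAddAt_fold
      (PySem.List.pyRange ((D : Int) + 1) (N + 1) ((D : Int) + 1))
      ((PySem.List.pyRange 1 ((D : Int) + 1) 1).foldl
        (fun ks d => (PySem.List.pyRange d (N + 1) d).foldl
            (fun ks m => PySem.List.pySetD ks m (PySem.List.pyGetD ks m 0 + k * d)) ks)
        (List.replicate (N + 1).toNat (0 : Int)))
      (k * ((D : Int) + 1))
      (pvStride_nodup _ _ (by omega))
      (by
        intro i hi
        rw [PySem.List.mem_pyRange_iff_of_pos (by omega)] at hi
        obtain ⟨h1, h2, _⟩ := hi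
        rw [ihlen]
        constructor
        · omega
        · omega)
    refine ⟨by rw [alen, ihlen], ?_⟩
    intro m hm
    rw [aget m, ihget m hm]
    have hcN : (N + 1) = ((N.toNat : Int) + 1) := by omega
    have hmem : ((m : Int) ∈ PySem.List.pyRange ((D : Int) + 1) (N + 1) ((D : Int) + 1))
        ↔ ((D + 1) ∣ m ∧ 1 ≤ m) := by
      rw [hcN]
      exact pvStride_mem D m N.toNat (by omega)
    rw [Finset.sum_Icc_succ_top (by omega : 1 ≤ D + 1)]
    by_cases hc : (D + 1) ∣ m ∧ 1 ≤ m
    · rw [if_pos (hmem.mpr hc), if_pos hc]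
      push_cast
      try ring
    · rw [if_neg (fun h => hc (hmem.mp h)), if_neg hc]
      try ring
theorem pvKsig_agree (N k : Int) (hN : 0 ≤ N) (m : Nat) (hm1 : 1 ≤ m) (hm : (m : Int) ≤ N) :
    (∑ d ∈ Finset.Icc 1 N.toNat, (if d ∣ m ∧ 1 ≤ m then k * (d : Int) else 0)) = k * pvSigma m := by
  have hmN : m ≤ N.toNat := by omega
  have h1 : (∑ d ∈ Finset.Icc 1 N.toNat, (if d ∣ m ∧ 1 ≤ m then k * (d : Int) else 0))
      = ∑ d ∈ (Finset.Icc 1 N.toNat).filter (fun d => d ∣ m ∧ 1 ≤ m), k * (d : Int) :=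
    (Finset.sum_filter _ _).symm
  have h2 : (Finset.Icc 1 N.toNat).filter (fun d => d ∣ m ∧ 1 ≤ m) = Nat.divisors m := by
    ext e
    simp only [Finset.mem_filter, Finset.mem_Icc, Nat.mem_divisors]
    constructor
    · rintro ⟨⟨he1, he2⟩, hdvd, _⟩
      exact ⟨hdvd, by omega⟩
    · rintro ⟨hdvd, hm0⟩
      have he1 : 1 ≤ e := Nat.pos_of_dvd_of_pos hdvd (by omega)
      have he2 : e ≤ m := Nat.le_of_dvd (by omega) hdvd
      exact ⟨⟨he1, by omega⟩, hdvd, by omega⟩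
  rw [h1, h2, pvSigma, Finset.mul_sum]
theorem pvGetD_append_left (xs ys : List Int) (i : Int) (h0 : 0 ≤ i) (h : i < (xs.length : Int)) :
    PySem.List.pyGetD (xs ++ ys) i 0 = PySem.List.pyGetD xs i 0 := by
  rw [PySem.List.pyGetD_eq_getElem (xs ++ ys) 0 h0 (by rw [List.length_append]; push_cast; omega),
    PySem.List.pyGetD_eq_getElem xs 0 h0 h]
  exact List.getElem_append_left (by omega)

theorem pvDP_eq (N : Int) (hN : 0 ≤ N) (ka kb : List Int)
    (hk : ∀ j : Int, 1 ≤ j → j ≤ N → PySem.List.pyGetD ka j 0 = PySem.List.pyGetD kb j 0)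
    (D : Nat) (hD : (D : Int) ≤ N) :
    ((PySem.List.pyRange 1 ((D : Int) + 1) 1).foldl
        (fun pk n =>
          PySem.List.pySetD pk n (PySem.Int.floordiv
            ((PySem.List.pyRange 1 (n + 1) 1).foldl
              (fun s j => s + PySem.List.pyGetD ka j 0 * PySem.List.pyGetD pk (n - j) 0) 0) n))
        (PySem.List.pySetD (List.replicate (N + 1).toNat (0 : Int)) 0 1))
      = ((PySem.List.pyRange 1 ((D : Int) + 1) 1).foldl
        (fun pk n =>
          pk ++ [PySem.Int.floordiv
            ((PySem.List.pyRange 1 (n + 1) 1).foldl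
              (fun s j => s + PySem.List.pyGetD kb j 0 * PySem.List.pyGetD pk (n - j) 0) 0) n])
        [1]) ++ List.replicate (N - (D : Int)).toNat 0 ∧
    ((PySem.List.pyRange 1 ((D : Int) + 1) 1).foldl
        (fun pk n =>
          pk ++ [PySem.Int.floordiv
            ((PySem.List.pyRange 1 (n + 1) 1).foldl
              (fun s j => s + PySem.List.pyGetD kb j 0 * PySem.List.pyGetD pk (n - j) 0) 0) n])
        [1]).length = D + 1 := by
  induction D with
  | zero =>
    rw [show ((0 : Nat) : Int) + 1 = 1 by norm_num, PySem.List.pyRange_one_eq_nil (le_refl 1)]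
    simp only [List.foldl_nil]
    constructor
    · rw [PySem.List.pySetD_of_nonneg _ 1 (le_refl 0)]
      rw [show (N + 1).toNat = N.toNat + 1 by omega, List.replicate_succ]
      simp
      try omega
    · simp
  | succ D ih =>
    have hD' : (D : Int) ≤ N := by push_cast at hD; omega
    obtain ⟨ihA, ihlenB⟩ := ih hD'
    have hcast : ((D + 1 : Nat) : Int) + 1 = ((D : Int) + 1) + 1 := by push_cast; ring
    rw [hcast, PySem.List.pyRange_one_succ_right (show (1:Int) ≤ (D : Int) + 1 by omega),
      List.foldl_append, List.foldl_append]
    simp only [List.foldl_cons, List.foldl_nil]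
    set PA := ((PySem.List.pyRange 1 ((D : Int) + 1) 1).foldl
        (fun pk n =>
          PySem.List.pySetD pk n (PySem.Int.floordiv
            ((PySem.List.pyRange 1 (n + 1) 1).foldl
              (fun s j => s + PySem.List.pyGetD ka j 0 * PySem.List.pyGetD pk (n - j) 0) 0) n))
        (PySem.List.pySetD (List.replicate (N + 1).toNat (0 : Int)) 0 1)) with hPA
    set PB := ((PySem.List.pyRange 1 ((D : Int) + 1) 1).foldl
        (fun pk n =>
          pk ++ [PySem.Int.floordiv
            ((PySem.List.pyRange 1 (n + 1) 1).foldl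
              (fun s j => s + PySem.List.pyGetD kb j 0 * PySem.List.pyGetD pk (n - j) 0) 0) n])
        [1]) with hPB
    have hinner : ((PySem.List.pyRange 1 (((D : Int) + 1) + 1) 1).foldl
          (fun s j => s + PySem.List.pyGetD ka j 0 * PySem.List.pyGetD PA (((D : Int) + 1) - j) 0) 0)
        = ((PySem.List.pyRange 1 (((D : Int) + 1) + 1) 1).foldl
          (fun s j => s + PySem.List.pyGetD kb j 0 * PySem.List.pyGetD PB (((D : Int) + 1) - j) 0) 0) := by
      apply PySem.List.foldl_congr_mem
      intro acc j hj
      rw [PySem.List.mem_pyRange_one] at hj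
      have h1 : PySem.List.pyGetD ka j 0 = PySem.List.pyGetD kb j 0 := hk j hj.1 (by omega)
      have h2 : PySem.List.pyGetD PA (((D : Int) + 1) - j) 0
          = PySem.List.pyGetD PB (((D : Int) + 1) - j) 0 := by
        rw [ihA, pvGetD_append_left _ _ _ (by omega) (by rw [ihlenB]; push_cast; omega)]
      rw [h1, h2]
    rw [hinner, ihA]
    set v := PySem.Int.floordiv
        ((PySem.List.pyRange 1 (((D : Int) + 1) + 1) 1).foldl
          (fun s j => s + PySem.List.pyGetD kb j 0 * PySem.List.pyGetD PB (((D : Int) + 1) - j) 0) 0)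
        ((D : Int) + 1) with hv
    constructor
    · rw [show ((D : Int) + 1) = ((D + 1 : Nat) : Int) by push_cast; ring, PySem.List.pySetD_natCast]
      rw [List.set_append_right _ _ (by rw [ihlenB]), ihlenB]
      rw [show (N - (D : Int)).toNat = (N - ((D : Int) + 1)).toNat + 1 by omega, List.replicate_succ]
      simp only [Nat.sub_self, List.set_cons_zero]
      rw [show (N - ((D + 1 : Nat) : Int)) = N - ((D : Int) + 1) by omega]
      simp [List.append_assoc]
    · simp [ihlenB]

-- ===== VERDICT (by name: the statement is the Claim_ definition above) =====
theorem compute_pk_spec : Claim_equal_compute_pk := by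
  intro N k _ hpre
  unfold Pre_compute_pk at hpre
  have hN : 0 ≤ N := hpre
  unfold Spec_compute_pk
  simp only [compute_pk, compute_pk_alt]
  have hA := pvKsigA_char N k hN N.toNat (by omega)
  rw [show ((N.toNat : Nat) : Int) + 1 = N + 1 by omega] at hA
  have hB := pvKsigB_char N k hN N.toNat (by omega)
  rw [show ((N.toNat : Nat) : Int) + 1 = N + 1 by omega] at hB
  have hk : ∀ j : Int, 1 ≤ j → j ≤ N →
      PySem.List.pyGetD ((PySem.List.pyRange 1 (N + 1) 1).foldl
        (fun ks j => PySem.List.pySetD ks j (k * pvSigGo j 0 1))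
        (List.replicate (N + 1).toNat (0 : Int))) j 0
      = PySem.List.pyGetD ((PySem.List.pyRange 1 (N + 1) 1).foldl
        (fun ks d => (PySem.List.pyRange d (N + 1) d).foldl
            (fun ks m => PySem.List.pySetD ks m (PySem.List.pyGetD ks m 0 + k * d)) ks)
        (List.replicate (N + 1).toNat (0 : Int))) j 0 := by
    intro j hj1 hjN
    rw [show j = ((j.toNat : Nat) : Int) by omega, PySem.List.pyGetD_natCast,
      PySem.List.pyGetD_natCast]
    rw [hA.2 j.toNat, hB.2 j.toNat (by omega), if_pos (by constructor <;> omega)]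
    exact (pvKsig_agree N k hN j.toNat (by omega) (by omega)).symm
  have hDP := pvDP_eq N hN _ _ hk N.toNat (by omega)
  rw [show ((N.toNat : Nat) : Int) + 1 = N + 1 by omega,
    show (N - ((N.toNat : Nat) : Int)).toNat = 0 by omega] at hDP
  simpa using hDP.1
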